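-- pv_equiv track=rewrite | github.com/awslabs/DefectDetectionApplication | edge-cv-portal/backend/layers/shared/python/shared_utils.py | _validate_s3_key
-- ===== SOURCE A (Python) =====
-- def _validate_s3_key(key: str) -> bool:
--     """Validate that the key meets S3 object key requirements"""
--     if not key or len(key) > 1024:
--         return False
--
--     # S3 key cannot contain certain characters
--     invalid_chars = ['\\', '{', '^', '}', '%', '`', ']', '"', '>', '[', '~', '<', '#', '|']
--     if any(char in key for char in invalid_chars):
--         return False
--
--     # Cannot have consecutive slashes or start/end with slash
--     if '//' in key or key.startswith('/') or key.endswith('/'):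
--         return False
--
--     return True
-- ===== SOURCE B (Python) =====
-- def _validate_s3_key(key: str) -> bool:
--     if not key or len(key) > 1024:
--         return False
--     if key[0] == '/' or key[-1] == '/':
--         return False
--     invalid = set('\\{^}%`]">[~<#|')
--     prev = ''
--     for ch in key:
--         if ch in invalid:
--             return False
--         if prev == '/' and ch == '/':
--             return False
--         prev = ch
--     return True
-- ===== Notes on version B (the rewrite author's own statement) =====
-- stated objective: alternative
-- what changed: A's 14 separate substring scans, a consecutive-slash substring search and startswith/endswith checks are merged into a single stateful pass over the key with a previous-character state and one invalid-character set, plus O(1) first/last-character checks.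
import Mathlib
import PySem

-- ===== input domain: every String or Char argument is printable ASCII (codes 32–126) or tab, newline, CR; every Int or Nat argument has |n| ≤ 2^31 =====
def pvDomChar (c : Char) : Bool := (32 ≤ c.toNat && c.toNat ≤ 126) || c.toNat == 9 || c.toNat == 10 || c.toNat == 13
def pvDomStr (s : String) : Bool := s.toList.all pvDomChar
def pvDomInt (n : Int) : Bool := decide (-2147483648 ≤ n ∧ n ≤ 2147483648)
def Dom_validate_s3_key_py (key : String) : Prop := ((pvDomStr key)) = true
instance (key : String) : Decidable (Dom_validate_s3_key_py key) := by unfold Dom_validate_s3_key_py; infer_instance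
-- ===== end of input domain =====

-- B merges A's many separate scans (14 substring tests, '//' search, startswith/endswith)
-- into one stateful pass with a prev-character; objective: alternative/simpler single traversal.

-- ===== PORT A =====
def validate_s3_key_py (key : String) : Bool :=
  if PySem.Str.len key = 0 ∨ PySem.Str.len key > 1024 then false
  else
    let invalid_chars : List String :=
      ["\\", "{", "^", "}", "%", "`", "]", "\"", ">", "[", "~", "<", "#", "|"]
    if invalid_chars.any (fun c => PySem.Str.isIn c key) then false
    else if PySem.Str.isIn "//" key || PySem.Str.startswith key "/" || PySem.Str.endswith key "/" then
      false
    else true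

-- ===== PORT B =====
-- invalid = set('\\{^}%`]">[~<#|')
def pvInvalid : PySem.Set Char := PySem.Set.ofList "\\{^}%`]\">[~<#|".toList

-- the for-loop of Source B: prev is None before the first iteration ('' in Python), else the last char
def pvLoop (prev : Option Char) (l : List Char) : Bool :=
  match l with
  | [] => true
  | ch :: rest =>
    if pvInvalid.contains ch then false
    else if prev = some '/' ∧ ch = '/' then false
    else pvLoop (some ch) rest

def validate_s3_key_py_alt (key : String) : Bool :=
  if PySem.Str.len key = 0 ∨ PySem.Str.len key > 1024 then false
  else if PySem.Str.pyGet? key 0 = some '/' ∨ PySem.Str.pyGet? key (-1) = some '/' then false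
  else pvLoop none key.toList

-- ===== PRECONDITION & SPEC =====
def Spec_validate_s3_key_py (key : String) (out : Bool) : Prop := out = validate_s3_key_py_alt key
instance (key : String) (out : Bool) : Decidable (Spec_validate_s3_key_py key out) := by unfold Spec_validate_s3_key_py; infer_instance

-- ===== CLAIM (what is proved, stated in full; the proofs are below) =====
def Claim_equal_validate_s3_key_py : Prop := ∀ (key : String), Dom_validate_s3_key_py key → Spec_validate_s3_key_py key (validate_s3_key_py key)

-- ===== LEMMAS AND PROOFS =====

lemma pvSingleton_prefix_iff (x : Char) (l : List Char) :
    [x] <+: l ↔ l.head? = some x := by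
  cases l with
  | nil => simp
  | cons a t => simp [List.cons_prefix_cons, eq_comm]

lemma pvLoop_iff (prev : Option Char) (l : List Char) :
    pvLoop prev l = true ↔
      (∀ c ∈ l, pvInvalid.contains c = false) ∧ ¬ (['/', '/'] <:+: l) ∧
        ¬ (prev = some '/' ∧ l.head? = some '/') := by
  induction l generalizing prev with
  | nil => simp [pvLoop]
  | cons ch t ih =>
    rw [pvLoop]
    simp only [List.head?_cons, Option.some.injEq]
    have hslash : ['/', '/'] <:+: ch :: t ↔
        (ch = '/' ∧ t.head? = some '/') ∨ ['/', '/'] <:+: t := by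
      rw [List.infix_cons_iff, List.cons_prefix_cons, pvSingleton_prefix_iff]
      exact or_congr (and_congr eq_comm Iff.rfl) Iff.rfl
    by_cases hc : pvInvalid.contains ch = true
    · rw [if_pos hc]
      constructor
      · intro h; exact absurd h (by simp)
      · rintro ⟨h1, -, -⟩
        have := h1 ch (by simp)
        rw [hc] at this; exact absurd this (by simp)
    · rw [if_neg hc]
      by_cases hp : prev = some '/' ∧ ch = '/'
      · rw [if_pos hp]
        constructor
        · intro h; exact absurd h (by simp)
        · rintro ⟨-, -, h3⟩; exact (h3 hp).elim
      · rw [if_neg hp, ih (some ch)]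
        constructor
        · rintro ⟨h1, h2, h3⟩
          refine ⟨?_, ?_, hp⟩
          · rintro c hm
            rcases List.mem_cons.mp hm with rfl | hm'
            · exact Bool.eq_false_iff.mpr hc
            · exact h1 c hm'
          · rw [hslash]
            rintro (⟨hch, hh⟩ | hi)
            · exact h3 ⟨by rw [hch], hh⟩
            · exact h2 hi
        · rintro ⟨h1, h2, h3⟩
          refine ⟨fun c hm => h1 c (List.mem_cons_of_mem _ hm), ?_, ?_⟩
          · intro hi; exact h2 (hslash.mpr (Or.inr hi))
          · rintro ⟨hsc, hh⟩
            exact h2 (hslash.mpr (Or.inl ⟨Option.some.inj hsc, hh⟩))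

lemma pvMain (key : String) : validate_s3_key_py key = validate_s3_key_py_alt key := by
  unfold validate_s3_key_py validate_s3_key_py_alt
  by_cases h0 : PySem.Str.len key = 0 ∨ PySem.Str.len key > 1024
  · rw [if_pos h0, if_pos h0]
  · rw [if_neg h0, if_neg h0]
    have hpair : ∀ (c : String) (x : Char), c.toList = [x] →
        (PySem.Str.isIn c key = true ↔ x ∈ key.toList) := by
      intro c x hcx
      rw [PySem.Str.isIn_iff_infix c key, hcx]
      exact List.singleton_infix_iff x key.toList
    have hsw : PySem.Str.startswith key "/" = true ↔ key.toList.head? = some '/' := by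
      rw [show PySem.Str.startswith key "/" = PySem.Chars.startswith key.toList ['/'] from by
            simp]
      rw [PySem.Chars.startswith_iff, pvSingleton_prefix_iff]
    have hew : PySem.Str.endswith key "/" = true ↔ key.toList.getLast? = some '/' := by
      rw [show PySem.Str.endswith key "/" = PySem.Chars.endswith key.toList ['/'] from by simp]
      rw [PySem.Chars.endswith_iff]
      constructor
      · rintro ⟨pre, hpre⟩
        rw [← hpre]
        exact List.getLast?_concat
      · intro h
        obtain ⟨l', hl'⟩ := List.getLast?_eq_some_iff.mp h
        rw [hl']
        exact List.suffix_append l' ['/']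
    have hg0 : PySem.Str.pyGet? key (0 : Int) = key.toList.head? := by
      simp [PySem.List.pyGet?_zero, List.head?_eq_getElem?]
    have hg1 : PySem.Str.pyGet? key (-1 : Int) = key.toList.getLast? := by
      rw [show PySem.Str.pyGet? key (-1 : Int) = PySem.List.pyGet? key.toList (-1 : Int) from by
            simp]
      exact PySem.List.pyGet?_neg_one key.toList
    have hss : PySem.Str.isIn "//" key = true ↔ ['/', '/'] <:+: key.toList := by
      have h := PySem.Str.isIn_iff_infix "//" key
      rwa [show ("//" : String).toList = ['/', '/'] from by decide] at h
    have hinv : (["\\", "{", "^", "}", "%", "`", "]", "\"", ">", "[", "~", "<", "#", "|"] :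
          List String).any (fun c => PySem.Str.isIn c key) = true ↔
        ∃ x ∈ pvInvalid, x ∈ key.toList := by
      rw [List.any_eq_true]
      constructor
      · rintro ⟨c, hc, hin⟩
        fin_cases hc
        · exact ⟨'\\', by decide, (hpair "\\" '\\' (by decide)).mp hin⟩
        · exact ⟨'{', by decide, (hpair "{" '{' (by decide)).mp hin⟩
        · exact ⟨'^', by decide, (hpair "^" '^' (by decide)).mp hin⟩
        · exact ⟨'}', by decide, (hpair "}" '}' (by decide)).mp hin⟩
        · exact ⟨'%', by decide, (hpair "%" '%' (by decide)).mp hin⟩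
        · exact ⟨'`', by decide, (hpair "`" '`' (by decide)).mp hin⟩
        · exact ⟨']', by decide, (hpair "]" ']' (by decide)).mp hin⟩
        · exact ⟨'\"', by decide, (hpair "\"" '\"' (by decide)).mp hin⟩
        · exact ⟨'>', by decide, (hpair ">" '>' (by decide)).mp hin⟩
        · exact ⟨'[', by decide, (hpair "[" '[' (by decide)).mp hin⟩
        · exact ⟨'~', by decide, (hpair "~" '~' (by decide)).mp hin⟩
        · exact ⟨'<', by decide, (hpair "<" '<' (by decide)).mp hin⟩
        · exact ⟨'#', by decide, (hpair "#" '#' (by decide)).mp hin⟩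
        · exact ⟨'|', by decide, (hpair "|" '|' (by decide)).mp hin⟩
      · rintro ⟨x, hx, hmem⟩
        have hx' : x ∈ (['\\', '{', '^', '}', '%', '`', ']', '\"', '>', '[', '~', '<', '#', '|'] : List Char) := by
          simpa using (PySem.Set.mem_ofList _ x).mp hx
        fin_cases hx'
        · exact ⟨"\\", by decide, (hpair "\\" '\\' (by decide)).mpr hmem⟩
        · exact ⟨"{", by decide, (hpair "{" '{' (by decide)).mpr hmem⟩
        · exact ⟨"^", by decide, (hpair "^" '^' (by decide)).mpr hmem⟩
        · exact ⟨"}", by decide, (hpair "}" '}' (by decide)).mpr hmem⟩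
        · exact ⟨"%", by decide, (hpair "%" '%' (by decide)).mpr hmem⟩
        · exact ⟨"`", by decide, (hpair "`" '`' (by decide)).mpr hmem⟩
        · exact ⟨"]", by decide, (hpair "]" ']' (by decide)).mpr hmem⟩
        · exact ⟨"\"", by decide, (hpair "\"" '\"' (by decide)).mpr hmem⟩
        · exact ⟨">", by decide, (hpair ">" '>' (by decide)).mpr hmem⟩
        · exact ⟨"[", by decide, (hpair "[" '[' (by decide)).mpr hmem⟩
        · exact ⟨"~", by decide, (hpair "~" '~' (by decide)).mpr hmem⟩
        · exact ⟨"<", by decide, (hpair "<" '<' (by decide)).mpr hmem⟩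
        · exact ⟨"#", by decide, (hpair "#" '#' (by decide)).mpr hmem⟩
        · exact ⟨"|", by decide, (hpair "|" '|' (by decide)).mpr hmem⟩
    rw [Bool.eq_iff_iff]
    constructor
    · intro h
      by_cases hA2 : (["\\", "{", "^", "}", "%", "`", "]", "\"", ">", "[", "~", "<", "#", "|"] :
          List String).any (fun c => PySem.Str.isIn c key) = true
      · rw [if_pos hA2] at h; simp at h
      · rw [if_neg hA2] at h
        by_cases hA3 : (PySem.Str.isIn "//" key || PySem.Str.startswith key "/" ||
            PySem.Str.endswith key "/") = true
        · rw [if_pos hA3] at h; simp at h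
        · simp only [Bool.or_eq_true, not_or] at hA3
          have hGuard : ¬ (PySem.Str.pyGet? key 0 = some '/' ∨ PySem.Str.pyGet? key (-1) = some '/') := by
            rw [hg0, hg1]
            push_neg
            exact ⟨fun hh => hA3.1.2 (hsw.mpr hh), fun hh => hA3.2 (hew.mpr hh)⟩
          rw [if_neg hGuard, pvLoop_iff]
          refine ⟨?_, ?_, by simp⟩
          · intro c hc
            by_contra hcc
            rw [Bool.not_eq_false] at hcc
            exact hA2 (hinv.mpr ⟨c, (PySem.Set.contains_iff _ _).mp hcc, hc⟩)
          · intro hi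
            exact hA3.1.1 (hss.mpr hi)
    · intro h
      by_cases hB1 : PySem.Str.pyGet? key 0 = some '/' ∨ PySem.Str.pyGet? key (-1) = some '/'
      · rw [if_pos hB1] at h; simp at h
      · rw [if_neg hB1] at h
        rw [pvLoop_iff] at h
        obtain ⟨h1, h2, -⟩ := h
        push_neg at hB1
        rw [hg0, hg1] at hB1
        have hc2 : ¬ (PySem.Str.isIn "//" key || PySem.Str.startswith key "/" ||
            PySem.Str.endswith key "/") = true := by
          rw [Bool.or_eq_true, Bool.or_eq_true]
          push_neg
          exact ⟨⟨fun hh => h2 (hss.mp hh), fun hh => hB1.1 (hsw.mp hh)⟩,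
                 fun hh => hB1.2 (hew.mp hh)⟩
        have hc1 : ¬ (["\\", "{", "^", "}", "%", "`", "]", "\"", ">", "[", "~", "<", "#", "|"] :
            List String).any (fun c => PySem.Str.isIn c key) = true := by
          intro hh
          obtain ⟨x, hx, hmem⟩ := hinv.mp hh
          have := h1 x hmem
          rw [(PySem.Set.contains_iff _ _).mpr hx] at this
          exact absurd this (by simp)
        rw [if_neg hc1, if_neg hc2]

-- ===== VERDICT (by name: the statement is the Claim_ definition above) =====
theorem validate_s3_key_py_spec : Claim_equal_validate_s3_key_py := by
  intro key _
  unfold Spec_validate_s3_key_py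
  exact pvMain key
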